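-- pv_equiv track=rewrite | github.com/uguruysal0/lumberjack-bot | bot.py | create_moves_array
-- ===== SOURCE A (Python) =====
-- def insert_to_moves(moves, next_point, key):
--     if len(moves) != 0 and abs(moves[-1][1]-next_point) <= 50:
--         return moves
--     moves.append((key, next_point))
--     return moves
--
-- def create_moves_array(l, r):
--     """
--     Merge 2 sorted list in to one list,
--     """
--     moves = []
--     i = 0
--     j = 0
--     while i < len(l) and j < len(r):
--         l_point = l[i]
--         r_point = r[j]
--         if l_point > r_point:
--             moves = insert_to_moves(moves, l_point, "right")
--             i+=1
--         else:
--             moves = insert_to_moves(moves, r_point, "left")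
--             j+=1
--
--     while i < len(l):
--         l_point = l[i]
--         moves = insert_to_moves(moves, l_point, "right")
--         i+=1
--
--     while j < len(r):
--         r_point = r[j]
--         moves = insert_to_moves(moves, r_point, "left")
--         j+=1
--
--     return moves
-- ===== SOURCE B (Python) =====
-- def create_moves_array(l, r):
--     # Phase 1: raw head-comparison merge with origin tags, no filtering.
--     raw = []
--     i = 0
--     j = 0
--     while i < len(l) and j < len(r):
--         if l[i] > r[j]:
--             raw.append(("right", l[i]))
--             i += 1
--         else:
--             raw.append(("left", r[j]))
--             j += 1
--     while i < len(l):
--         raw.append(("right", l[i]))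
--         i += 1
--     while j < len(r):
--         raw.append(("left", r[j]))
--         j += 1
--     # Phase 2: proximity filter in a separate pass.
--     result = []
--     last = 0
--     for key, point in raw:
--         if not result or abs(last - point) > 50:
--             result.append((key, point))
--             last = point
--     return result
-- ===== Notes on version B (the rewrite author's own statement) =====
-- stated objective: alternative
-- what changed: A filters during the merge via insert_to_moves at every append; B first builds the raw tagged merge of the two lists with no filtering, then applies the proximity filter in a separate second pass maintaining a `last` variable.
import Mathlib
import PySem

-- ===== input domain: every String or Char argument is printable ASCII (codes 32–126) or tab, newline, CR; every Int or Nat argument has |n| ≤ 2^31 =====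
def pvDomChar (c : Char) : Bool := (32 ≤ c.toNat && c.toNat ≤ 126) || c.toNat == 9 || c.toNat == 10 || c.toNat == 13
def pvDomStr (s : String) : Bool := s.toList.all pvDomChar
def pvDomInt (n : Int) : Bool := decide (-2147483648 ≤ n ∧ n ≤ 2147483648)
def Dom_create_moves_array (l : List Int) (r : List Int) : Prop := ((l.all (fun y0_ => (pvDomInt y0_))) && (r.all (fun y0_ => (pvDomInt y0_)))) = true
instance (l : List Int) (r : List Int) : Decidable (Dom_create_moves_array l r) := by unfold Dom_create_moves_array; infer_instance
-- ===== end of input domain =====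

-- B re-decomposes A's fused merge-and-filter into a raw tagged merge followed by a
-- separate proximity-filter pass; same return value, same O(n+m) cost ("alternative").

-- ===== PORT A =====
-- insert_to_moves: skip the point when it is within 50 of the last kept one
def pvInsertTo (moves : List (String × Int)) (next_point : Int) (key : String) :
    List (String × Int) :=
  if moves.length ≠ 0 ∧ |(moves.getLastD ("", 0)).2 - next_point| ≤ 50 then moves
  else moves ++ [(key, next_point)]

-- the three while-loops of A, with `moves` as the accumulator
def pvMergeA : List Int → List Int → List (String × Int) → List (String × Int)
  | a :: as, b :: bs, m =>
      if a > b then pvMergeA as (b :: bs) (pvInsertTo m a "right")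
      else pvMergeA (a :: as) bs (pvInsertTo m b "left")
  | as, [], m => as.foldl (fun mv p => pvInsertTo mv p "right") m
  | [], bs, m => bs.foldl (fun mv p => pvInsertTo mv p "left") m
termination_by as bs _ => as.length + bs.length

def create_moves_array (l : List Int) (r : List Int) : List (String × Int) :=
  pvMergeA l r []

-- ===== PORT B =====
-- phase 1: raw tagged merge, no filtering
def pvMergeRaw : List Int → List Int → List (String × Int)
  | a :: as, b :: bs =>
      if a > b then ("right", a) :: pvMergeRaw as (b :: bs)
      else ("left", b) :: pvMergeRaw (a :: as) bs
  | as, [] => as.map (fun p => ("right", p))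
  | [], bs => bs.map (fun p => ("left", p))
termination_by as bs => as.length + bs.length

-- phase 2: one filter step of B's for-loop, state = (result, last)
def pvFilterStep (st : List (String × Int) × Int) (kp : String × Int) :
    List (String × Int) × Int :=
  if st.1 = [] ∨ 50 < |st.2 - kp.2| then (st.1 ++ [kp], kp.2) else st

def create_moves_array_alt (l : List Int) (r : List Int) : List (String × Int) :=
  ((pvMergeRaw l r).foldl pvFilterStep ([], 0)).1

-- ===== PRECONDITION & SPEC =====
def Spec_create_moves_array (l : List Int) (r : List Int) (out : List (String × Int)) : Prop := out = create_moves_array_alt l r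
instance (l : List Int) (r : List Int) (out : List (String × Int)) : Decidable (Spec_create_moves_array l r out) := by unfold Spec_create_moves_array; infer_instance

-- ===== CLAIM (what is proved, stated in full; the proofs are below) =====
def Claim_equal_create_moves_array : Prop := ∀ (l : List Int) (r : List Int), Dom_create_moves_array l r → Spec_create_moves_array l r (create_moves_array l r)

-- ===== LEMMAS AND PROOFS =====

-- A's fused loop = fold of insert_to_moves over B's raw merge
theorem mergeA_eq_foldl_raw (l r : List Int) (m : List (String × Int)) :
    pvMergeA l r m =
      (pvMergeRaw l r).foldl (fun mv kp => pvInsertTo mv kp.2 kp.1) m := by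
  induction l, r using pvMergeRaw.induct generalizing m with
  | case1 a as b bs h ih => simp [pvMergeA, pvMergeRaw, h, ih]
  | case2 a as b bs h ih => simp [pvMergeA, pvMergeRaw, h, ih]
  | case3 as => simp [pvMergeA, pvMergeRaw, List.foldl_map]
  | case4 bs hbs => simp [pvMergeA, pvMergeRaw, List.foldl_map]

-- B's filter pass computes the same fold, given the `last` invariant
theorem filter_eq_foldl_insert (raw : List (String × Int))
    (m : List (String × Int)) (last : Int)
    (h : m = [] ∨ last = (m.getLastD ("", 0)).2) :
    (raw.foldl pvFilterStep (m, last)).1 =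
      raw.foldl (fun mv kp => pvInsertTo mv kp.2 kp.1) m := by
  induction raw generalizing m last with
  | nil => rfl
  | cons kp raw ih =>
      rcases h with h | h
      · subst h
        simp only [List.foldl_cons, pvFilterStep, pvInsertTo]
        simp only [List.nil_append, List.length_nil, ne_eq, not_true_eq_false,
          false_and]
        exact ih _ _ (Or.inr (by simp))
      · subst h
        simp only [List.foldl_cons, pvFilterStep, pvInsertTo]
        by_cases hm : m = []
        · subst hm
          simp only [List.length_nil, ne_eq, not_true_eq_false, false_and,
            List.nil_append]
          exact ih _ _ (Or.inr (by simp))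
        · by_cases hd : |(m.getLastD ("", 0)).2 - kp.2| ≤ 50
          · rw [if_neg (by push Not; exact ⟨hm, by omega⟩), if_pos ⟨by simpa using hm, hd⟩]
            exact ih _ _ (Or.inr rfl)
          · rw [if_pos (by right; omega), if_neg (by intro h'; exact hd h'.2)]
            exact ih _ _ (Or.inr (by simp))

-- ===== VERDICT (by name: the statement is the Claim_ definition above) =====
theorem create_moves_array_spec : Claim_equal_create_moves_array := by
  intro l r _
  show create_moves_array l r = create_moves_array_alt l r
  rw [create_moves_array, create_moves_array_alt, mergeA_eq_foldl_raw,
    filter_eq_foldl_insert _ _ _ (Or.inl rfl)]
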